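-- pv_equiv track=rewrite | github.com/corona10/bf | interpreter.py | parse
-- ===== SOURCE A (Python) =====
-- def parse(program):
--     parsed = []
--     bracket_map = {}
--     leftstack = []
--
--     pc = 0
--     for c in program:
--         if c in '[]<>+-,.':
--             parsed.append(c)
--             if c == '[':
--                 leftstack.append(pc)
--             elif c == ']':
--                 left = leftstack.pop()
--                 right = pc
--                 bracket_map[left] = right
--                 bracket_map[right] = left
--             pc += 1
--
--     return ''.join(parsed), bracket_map
-- ===== SOURCE B (Python) =====
-- def parse(program):
--     cmds = ''.join(c for c in program if c in '[]<>+-,.')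
--
--     bracket_map = {}
--
--     def walk(i):
--         # consume commands from position i within one nesting level;
--         # return the index of the ']' that closes this level, or len(cmds)
--         while i < len(cmds):
--             c = cmds[i]
--             if c == ']':
--                 return i
--             if c == '[':
--                 j = walk(i + 1)
--                 if j < len(cmds):
--                     bracket_map[i] = j
--                     bracket_map[j] = i
--                 i = j + 1
--             else:
--                 i += 1
--         return len(cmds)
--
--     i = walk(0)
--     while i < len(cmds):
--         i = walk(i + 1)
--     return cmds, bracket_map
-- ===== Notes on version B (the rewrite author's own statement) =====
-- stated objective: alternative
-- what changed: B replaces A's single stack-machine pass (explicit leftstack of pending '[' indices plus a manual pc counter) by a recursive-descent parser: it first filters the command string, then a recursive walk follows the nesting structure itself, each call consuming one bracket level and cross-linking a '[' with the closing ']' index its recursive call returns, so no stack data structure exists.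
import Mathlib
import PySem

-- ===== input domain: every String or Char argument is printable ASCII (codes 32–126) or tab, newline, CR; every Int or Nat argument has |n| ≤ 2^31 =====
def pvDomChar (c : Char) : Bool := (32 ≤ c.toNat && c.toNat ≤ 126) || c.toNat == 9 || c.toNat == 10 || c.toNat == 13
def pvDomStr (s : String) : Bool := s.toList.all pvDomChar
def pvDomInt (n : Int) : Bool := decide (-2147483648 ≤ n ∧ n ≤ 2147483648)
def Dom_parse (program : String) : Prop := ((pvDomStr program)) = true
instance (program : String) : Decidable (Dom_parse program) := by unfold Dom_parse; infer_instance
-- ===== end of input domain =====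

-- B replaces A's stack-machine pass (explicit leftstack + manual pc counter) by a two-phase
-- recursive-descent parser over the filtered command list: each recursive call consumes one
-- nesting level and cross-links '[' with the ']' index its recursive call returns (no stack).


-- ===== PORT A =====
-- one fused loop: state = (parsed, bracket_map, leftstack, pc); a failing pop (Python IndexError,
-- excluded by Pre_parse) leaves bracket_map/leftstack unchanged
def parseStep (st : List Char × PySem.Dict Int Int × List Int × Int) (c : Char) :
    List Char × PySem.Dict Int Int × List Int × Int :=
  let (parsed, bmap, stack, pc) := st
  if c ∈ "[]<>+-,.".toList then
    let parsed := parsed ++ [c]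
    if c = '[' then (parsed, bmap, stack ++ [pc], pc + 1)
    else if c = ']' then
      match PySem.List.pop? stack (-1) with
      | some (left, rest) => (parsed, (bmap.insert left pc).insert pc left, rest, pc + 1)
      | none => (parsed, bmap, stack, pc + 1)
    else (parsed, bmap, stack, pc + 1)
  else (parsed, bmap, stack, pc)

def parse (program : String) : String × (List (Int × Int)) :=
  let st := program.toList.foldl parseStep ([], PySem.Dict.empty, [], 0)
  (String.mk st.1, st.2.1.items)

-- ===== PORT B =====
-- recursive descent: walkB consumes the suffix of cmds starting at absolute index i within one
-- nesting level; it returns the updated map and either (index of the ']' closing this level,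
-- remaining suffix after it) or none (Python's 'return len(cmds)', i.e. end of input reached).
-- The Nat argument is fuel making the recursion structural; fuel ≥ suffix length never runs out.
def walkB : Nat → List Char → Int → PySem.Dict Int Int → PySem.Dict Int Int × Option (Int × List Char)
  | 0, _, _, m => (m, none)
  | Nat.succ f, l, i, m =>
    match l with
    | [] => (m, none)
    | c :: rest =>
      if c = ']' then (m, some (i, rest))
      else if c = '[' then
        match walkB f rest (i+1) m with
        | (m', some (j, after)) => walkB f after (j+1) ((m'.insert i j).insert j i)
        | (m', none) => (m', none)
      else walkB f rest (i+1) m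

-- top-level driver: 'i = walk(0); while i < len(cmds): i = walk(i+1)'
def topB : Nat → List Char → Int → PySem.Dict Int Int → PySem.Dict Int Int
  | 0, _, _, m => m
  | Nat.succ f, l, i, m =>
    match walkB l.length l i m with
    | (m', some (j, after)) => topB f after (j+1) m'
    | (m', none) => m'

def parse_alt (program : String) : String × (List (Int × Int)) :=
  let cmds := program.toList.filter (fun c => c ∈ "[]<>+-,.".toList)
  (String.mk cmds, (topB (cmds.length + 1) cmds 0 PySem.Dict.empty).items)

-- ===== PRECONDITION & SPEC =====
-- Pre_ excludes exactly the programs on which A raises IndexError (a ']' with no matching '['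
-- among the command characters before it).
def Pre_parse (program : String) : Prop :=
  ∀ p ∈ (program.toList.filter (fun c => c ∈ "[]<>+-,.".toList)).inits,
    p.count ']' ≤ p.count '['
instance (program : String) : Decidable (Pre_parse program) := by unfold Pre_parse; infer_instance

def pvWitness_parse : String := "a+[x[-]>]b"

def Spec_parse (program : String) (out : String × (List (Int × Int))) : Prop := out = parse_alt program
instance (program : String) (out : String × (List (Int × Int))) : Decidable (Spec_parse program out) := by unfold Spec_parse; infer_instance

-- ===== CLAIM (what is proved, stated in full; the proofs are below) =====
def Claim_equal_parse : Prop := ∀ (program : String), Dom_parse program → Pre_parse program → Spec_parse program (parse program)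

-- ===== LEMMAS AND PROOFS =====

-- proof device: A's bracket machine restricted to (map, stack), driven by the enumerated
-- filtered command list

def mstep (st : PySem.Dict Int Int × List Int) (ic : Int × Char) :
    PySem.Dict Int Int × List Int :=
  let (bmap, stack) := st
  if ic.2 = '[' then (bmap, stack ++ [ic.1])
  else if ic.2 = ']' then
    match PySem.List.pop? stack (-1) with
    | some (left, rest) => ((bmap.insert left ic.1).insert ic.1 left, rest)
    | none => (bmap, stack)
  else st

lemma mstep_open (m : PySem.Dict Int Int) (s : List Int) (i : Int) :
    mstep (m, s) (i, '[') = (m, s ++ [i]) := by simp [mstep]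

lemma mstep_close (m : PySem.Dict Int Int) (q : List Int) (x i : Int) :
    mstep (m, q ++ [x]) (i, ']') = ((m.insert x i).insert i x, q) := by
  simp [mstep, PySem.List.pop?_last]

lemma mstep_other (m : PySem.Dict Int Int) (s : List Int) (i : Int) (c : Char)
    (h1 : c ≠ ']') (h2 : c ≠ '[') : mstep (m, s) (i, c) = (m, s) := by
  simp [mstep, h1, h2]

lemma G_run (p : List Char) : ∀ (i : Int) (m : PySem.Dict Int Int) (s u : List Int),
    (∀ q ∈ p.inits, q.count ']' ≤ q.count '[' + u.length) →
    (PySem.List.enumerate p i).foldl mstep (m, s ++ u) =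
      (((PySem.List.enumerate p i).foldl mstep (m, u)).1,
       s ++ ((PySem.List.enumerate p i).foldl mstep (m, u)).2) ∧
    ((PySem.List.enumerate p i).foldl mstep (m, u)).2.length + p.count ']' =
      u.length + p.count '[' := by
  induction p with
  | nil => intro i m s u h; simp
  | cons c r ih =>
    intro i m s u h
    rw [PySem.List.enumerate_cons]
    simp only [List.foldl_cons]
    by_cases h1 : c = '['
    · subst h1
      rw [mstep_open, mstep_open, List.append_assoc]
      have hr : ∀ q ∈ r.inits, q.count ']' ≤ q.count '[' + (u ++ [i]).length := by
        intro q hq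
        have := h ('[' :: q) (by
          rw [List.inits_cons]
          exact List.mem_cons.2 (Or.inr (List.mem_map.2 ⟨q, hq, rfl⟩)))
        simp [List.count_cons] at this ⊢
        omega
      have := ih (i+1) m s (u ++ [i]) hr
      refine ⟨this.1, ?_⟩
      have h2 := this.2
      simp [List.count_cons] at h2 ⊢
      omega
    · by_cases h2 : c = ']'
      · subst h2
        have hu : u ≠ [] := by
          have := h [']'] (by
            rw [List.inits_cons]
            exact List.mem_cons.2 (Or.inr (List.mem_map.2 ⟨[], by simp, rfl⟩)))
          simp at this
          intro he; rw [he] at this; simp at this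
        obtain ⟨q, x, rfl⟩ := u.eq_nil_or_concat.resolve_left hu
        simp only [List.concat_eq_append]
        rw [← List.append_assoc]
        rw [mstep_close m (s ++ q) x i, mstep_close m q x i]
        have hr : ∀ q' ∈ r.inits, q'.count ']' ≤ q'.count '[' + q.length := by
          intro q' hq'
          have := h (']' :: q') (by
            rw [List.inits_cons]
            exact List.mem_cons.2 (Or.inr (List.mem_map.2 ⟨q', hq', rfl⟩)))
          simp [List.count_cons] at this ⊢
          omega
        have := ih (i+1) ((m.insert x i).insert i x) s q hr
        refine ⟨this.1, ?_⟩
        have h3 := this.2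
        simp [List.count_cons] at h3 ⊢
        omega
      · rw [mstep_other m _ i c h2 h1, mstep_other m _ i c h2 h1]
        have hr : ∀ q ∈ r.inits, q.count ']' ≤ q.count '[' + u.length := by
          intro q hq
          have := h (c :: q) (by
            rw [List.inits_cons]
            exact List.mem_cons.2 (Or.inr (List.mem_map.2 ⟨q, hq, rfl⟩)))
          simp [List.count_cons, h1, h2] at this ⊢
          omega
        have := ih (i+1) m s u hr
        refine ⟨this.1, ?_⟩
        have h3 := this.2
        simp [List.count_cons, h1, h2] at h3 ⊢
        omega

lemma step_eq (c : Char) (hc : c ∈ "[]<>+-,.".toList) (parsed : List Char)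
    (bmap : PySem.Dict Int Int) (stack : List Int) (k : Int) :
    parseStep (parsed, bmap, stack, k) c =
      (parsed ++ [c], (mstep (bmap, stack) (k, c)).1,
       (mstep (bmap, stack) (k, c)).2, k + 1) := by
  simp only [parseStep, mstep, if_pos hc]
  by_cases h1 : c = '['
  · simp [h1]
  · by_cases h2 : c = ']'
    · simp only [h2]
      cases hpop : PySem.List.pop? stack (-1) with
      | none => simp
      | some r => cases r with | mk l s => simp
    · simp [h1, h2]

lemma parse_fold_eq (l : List Char) (parsed : List Char) (bmap : PySem.Dict Int Int)
    (stack : List Int) (k : Int) :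
    l.foldl parseStep (parsed, bmap, stack, k) =
      (parsed ++ l.filter (fun c => c ∈ "[]<>+-,.".toList),
       ((PySem.List.enumerate (l.filter (fun c => c ∈ "[]<>+-,.".toList)) k).foldl
          mstep (bmap, stack)).1,
       ((PySem.List.enumerate (l.filter (fun c => c ∈ "[]<>+-,.".toList)) k).foldl
          mstep (bmap, stack)).2,
       k + (l.filter (fun c => c ∈ "[]<>+-,.".toList)).length) := by
  induction l generalizing parsed bmap stack k with
  | nil => simp
  | cons c rest ih =>
    by_cases hc : c ∈ "[]<>+-,.".toList
    · rw [List.foldl_cons, step_eq c hc, ih,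
        List.filter_cons_of_pos (by simpa using hc), PySem.List.enumerate_cons,
        List.foldl_cons, Prod.mk.eta]
      refine congrArg₂ Prod.mk (by simp) (congrArg₂ Prod.mk rfl (congrArg₂ Prod.mk rfl ?_))
      rw [List.length_cons]; push_cast; ring
    · rw [List.foldl_cons, List.filter_cons_of_neg (by simpa using hc)]
      simp only [parseStep, if_neg hc]
      exact ih parsed bmap stack k

-- index of the first ']' closing nesting depth d in a command list (none = no such ']')
def findClose : List Char → Nat → Option Nat
  | [], _ => none
  | c :: r, d =>
    if c = ']' then
      match d with
      | 0 => some 0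
      | Nat.succ d' => (findClose r d').map (· + 1)
    else if c = '[' then (findClose r (d+1)).map (· + 1)
    else (findClose r d).map (· + 1)

lemma fc_close0 (r : List Char) : findClose (']' :: r) 0 = some 0 := by simp [findClose]
lemma fc_close (r : List Char) (d : Nat) :
    findClose (']' :: r) (d+1) = (findClose r d).map (· + 1) := by simp [findClose]
lemma fc_open (r : List Char) (d : Nat) :
    findClose ('[' :: r) d = (findClose r (d+1)).map (· + 1) := by simp [findClose]
lemma fc_other (c : Char) (r : List Char) (d : Nat) (h1 : c ≠ ']') (h2 : c ≠ '[') :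
    findClose (c :: r) d = (findClose r d).map (· + 1) := by simp [findClose, h1, h2]

lemma fc_none_bal (l : List Char) (d : Nat) (h : findClose l d = none) :
    ∀ q ∈ l.inits, q.count ']' ≤ q.count '[' + d := by
  induction l generalizing d with
  | nil => intro q hq; simp at hq; simp [hq]
  | cons c r ih =>
    intro q hq
    rw [List.inits_cons] at hq
    rcases List.mem_cons.1 hq with hq | hq
    · simp [hq]
    · obtain ⟨q', hq', rfl⟩ := List.mem_map.1 hq
      by_cases h1 : c = ']'
      · subst h1
        match d with
        | 0 => rw [fc_close0] at h; exact absurd h (by simp)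
        | Nat.succ d' =>
          rw [fc_close, Option.map_eq_none_iff] at h
          have := ih d' h q' hq'
          simp [List.count_cons]; omega
      · by_cases h2 : c = '['
        · subst h2
          rw [fc_open, Option.map_eq_none_iff] at h
          have := ih (d+1) h q' hq'
          simp [List.count_cons]; omega
        · rw [fc_other c r d h1 h2, Option.map_eq_none_iff] at h
          have := ih d h q' hq'
          simp [List.count_cons, h1, h2]; omega

lemma fc_some_spec (l : List Char) (d j : Nat) (h : findClose l d = some j) :
    ∃ p a, l = p ++ ']' :: a ∧ p.length = j ∧ p.count ']' = p.count '[' + d ∧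
      (∀ q ∈ p.inits, q.count ']' ≤ q.count '[' + d) := by
  induction l generalizing d j with
  | nil => simp [findClose] at h
  | cons c r ih =>
    by_cases h1 : c = ']'
    · subst h1
      match d with
      | 0 =>
        rw [fc_close0, Option.some_inj] at h
        exact ⟨[], r, by simp, by simp [← h], by simp, by intro q hq; simp at hq; simp [hq]⟩
      | Nat.succ d' =>
        rw [fc_close, Option.map_eq_some_iff] at h
        obtain ⟨j', hj', rfl⟩ := h
        obtain ⟨p', a, rfl, hlen, hcnt, hbal⟩ := ih d' j' hj'
        refine ⟨']' :: p', a, by simp, by simp [hlen], by simp [List.count_cons]; omega, ?_⟩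
        intro q hq
        rw [List.inits_cons] at hq
        rcases List.mem_cons.1 hq with hq | hq
        · simp [hq]
        · obtain ⟨q', hq', rfl⟩ := List.mem_map.1 hq
          have := hbal q' hq'
          simp [List.count_cons]; omega
    · by_cases h2 : c = '['
      · subst h2
        rw [fc_open, Option.map_eq_some_iff] at h
        obtain ⟨j', hj', rfl⟩ := h
        obtain ⟨p', a, rfl, hlen, hcnt, hbal⟩ := ih (d+1) j' hj'
        refine ⟨'[' :: p', a, by simp, by simp [hlen], by simp [List.count_cons]; omega, ?_⟩
        intro q hq
        rw [List.inits_cons] at hq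
        rcases List.mem_cons.1 hq with hq | hq
        · simp [hq]
        · obtain ⟨q', hq', rfl⟩ := List.mem_map.1 hq
          have := hbal q' hq'
          simp [List.count_cons]; omega
      · rw [fc_other c r d h1 h2, Option.map_eq_some_iff] at h
        obtain ⟨j', hj', rfl⟩ := h
        obtain ⟨p', a, rfl, hlen, hcnt, hbal⟩ := ih d j' hj'
        refine ⟨c :: p', a, by simp, by simp [hlen], by simp [List.count_cons, h1, h2]; omega, ?_⟩
        intro q hq
        rw [List.inits_cons] at hq
        rcases List.mem_cons.1 hq with hq | hq
        · simp [hq]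
        · obtain ⟨q', hq', rfl⟩ := List.mem_map.1 hq
          have := hbal q' hq'
          simp [List.count_cons, h1, h2]; omega

lemma fc_step_none (l : List Char) (d : Nat) (h : findClose l d = none) :
    findClose l (d+1) = none := by
  induction l generalizing d with
  | nil => simp [findClose]
  | cons c r ih =>
    by_cases h1 : c = ']'
    · subst h1
      match d with
      | 0 => rw [fc_close0] at h; exact absurd h (by simp)
      | Nat.succ d' =>
        rw [fc_close, Option.map_eq_none_iff] at h
        rw [fc_close, Option.map_eq_none_iff]
        exact ih d' h
    · by_cases h2 : c = '['
      · subst h2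
        rw [fc_open, Option.map_eq_none_iff] at h
        rw [fc_open, Option.map_eq_none_iff]
        exact ih (d+1) h
      · rw [fc_other c r d h1 h2, Option.map_eq_none_iff] at h
        rw [fc_other c r (d+1) h1 h2, Option.map_eq_none_iff]
        exact ih d h

lemma fc_step_some (l : List Char) (d k : Nat) (h : findClose l d = some k) :
    findClose l (d+1) = (findClose (l.drop (k+1)) 0).map (fun j => k + 1 + j) := by
  induction l generalizing d k with
  | nil => simp [findClose] at h
  | cons c r ih =>
    by_cases h1 : c = ']'
    · subst h1
      match d with
      | 0 =>
        rw [fc_close0, Option.some_inj] at h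
        subst h
        rw [fc_close, List.drop_succ_cons, List.drop_zero]
        congr 1; funext j; omega
      | Nat.succ d' =>
        rw [fc_close, Option.map_eq_some_iff] at h
        obtain ⟨k', hk', rfl⟩ := h
        rw [fc_close, ih d' k' hk', List.drop_succ_cons, Option.map_map]
        congr 1; funext j; simp; omega
    · by_cases h2 : c = '['
      · subst h2
        rw [fc_open, Option.map_eq_some_iff] at h
        obtain ⟨k', hk', rfl⟩ := h
        rw [fc_open, ih (d+1) k' hk', List.drop_succ_cons, Option.map_map]
        congr 1; funext j; simp; omega
      · rw [fc_other c r d h1 h2, Option.map_eq_some_iff] at h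
        obtain ⟨k', hk', rfl⟩ := h
        rw [fc_other c r (d+1) h1 h2, ih d k' hk', List.drop_succ_cons, Option.map_map]
        congr 1; funext j; simp; omega

lemma pre_findClose_none (l : List Char) (h : ∀ q ∈ l.inits, q.count ']' ≤ q.count '[') :
    findClose l 0 = none := by
  cases h' : findClose l 0 with
  | none => rfl
  | some j =>
    obtain ⟨p, a, rfl, _, hcnt, _⟩ := fc_some_spec _ _ _ h'
    have := h (p ++ [']']) (by rw [List.mem_inits]; exact ⟨a, by simp⟩)
    simp [List.count_append] at this
    omega

lemma fold_cons_other (c : Char) (r : List Char) (i : Int) (m : PySem.Dict Int Int)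
    (h1 : c ≠ ']') (h2 : c ≠ '[') :
    (PySem.List.enumerate (c :: r) i).foldl mstep (m, []) =
      (PySem.List.enumerate r (i+1)).foldl mstep (m, []) := by
  rw [PySem.List.enumerate_cons, List.foldl_cons, mstep_other m [] i c h1 h2]

lemma fold_open_none (r : List Char) (i : Int) (m : PySem.Dict Int Int)
    (hbal : ∀ q ∈ r.inits, q.count ']' ≤ q.count '[') :
    ((PySem.List.enumerate ('[' :: r) i).foldl mstep (m, [])).1 =
      ((PySem.List.enumerate r (i+1)).foldl mstep (m, [])).1 := by
  rw [PySem.List.enumerate_cons, List.foldl_cons, mstep_open]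
  have h := (G_run r (i+1) m [i] [] (by simpa using hbal)).1
  simp only [List.append_nil, List.nil_append] at h ⊢
  rw [h]

lemma fold_open_close (p a : List Char) (i : Int) (m : PySem.Dict Int Int)
    (hbal : ∀ q ∈ p.inits, q.count ']' ≤ q.count '[') (hcnt : p.count ']' = p.count '[') :
    (PySem.List.enumerate ('[' :: (p ++ ']' :: a)) i).foldl mstep (m, []) =
      (PySem.List.enumerate a (i + 1 + (p.length : Int) + 1)).foldl mstep
        (((((PySem.List.enumerate p (i+1)).foldl mstep (m, [])).1.insert i
            (i + 1 + (p.length : Int))).insert (i + 1 + (p.length : Int)) i), []) := by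
  rw [PySem.List.enumerate_cons, List.foldl_cons, mstep_open]
  rw [PySem.List.enumerate_append, List.foldl_append]
  have hG := G_run p (i+1) m [i] [] (by simpa using hbal)
  have hstack : ((PySem.List.enumerate p (i+1)).foldl mstep (m, [])).2 = [] := by
    have h2 := hG.2
    simp [hcnt] at h2
    exact h2
  have h1 := hG.1
  simp only [List.append_nil, List.nil_append] at h1 ⊢
  rw [h1, hstack, List.append_nil]
  rw [PySem.List.enumerate_cons, List.foldl_cons]
  rw [show ([i] : List Int) = [] ++ [i] from by simp, mstep_close]

-- the recursive descent computes exactly the machine's map up to the first unmatched ']'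
lemma walkB_nil (f : Nat) (i : Int) (m : PySem.Dict Int Int) :
    walkB f [] i m = (m, none) := by cases f <;> simp [walkB]

lemma walkB_close (f : Nat) (rest : List Char) (i : Int) (m : PySem.Dict Int Int) :
    walkB (f+1) (']' :: rest) i m = (m, some (i, rest)) := by simp [walkB]

lemma walkB_open (f : Nat) (rest : List Char) (i : Int) (m : PySem.Dict Int Int) :
    walkB (f+1) ('[' :: rest) i m =
      match walkB f rest (i+1) m with
      | (m', some (j, after)) => walkB f after (j+1) ((m'.insert i j).insert j i)
      | (m', none) => (m', none) := by simp [walkB]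

lemma walkB_other (f : Nat) (c : Char) (rest : List Char) (i : Int) (m : PySem.Dict Int Int)
    (h1 : c ≠ ']') (h2 : c ≠ '[') :
    walkB (f+1) (c :: rest) i m = walkB f rest (i+1) m := by simp [walkB, h1, h2]

lemma walk_spec (n : Nat) : ∀ (l : List Char), l.length ≤ n → ∀ (f : Nat), l.length ≤ f →
    ∀ (i : Int) (m : PySem.Dict Int Int),
    walkB f l i m = match findClose l 0 with
      | some j => (((PySem.List.enumerate (l.take j) i).foldl mstep (m, [])).1,
                   some (i + (j : Int), l.drop (j+1)))
      | none => (((PySem.List.enumerate l i).foldl mstep (m, [])).1, none) := by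
  induction n with
  | zero =>
    intro l hl f hf i m
    have hln : l = [] := List.eq_nil_of_length_eq_zero (Nat.le_zero.1 hl)
    subst hln
    simp [walkB_nil, findClose]
  | succ n ihn =>
    intro l hl f hf i m
    cases l with
    | nil => simp [walkB_nil, findClose]
    | cons c rest =>
      cases f with
      | zero => simp at hf
      | succ f' =>
        have hrn : rest.length ≤ n := by simp at hl; omega
        have hrf : rest.length ≤ f' := by simp at hf; omega
        by_cases h2 : c = ']'
        · subst h2
          rw [walkB_close, fc_close0]
          simp
        · by_cases h1 : c = '['
          · subst h1
            rw [walkB_open, ihn rest hrn f' hrf (i+1) m]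
            cases hrest : findClose rest 0 with
            | none =>
              have hfc : findClose ('[' :: rest) 0 = none := by
                rw [fc_open, fc_step_none rest 0 hrest]; rfl
              rw [hfc]
              simp only []
              rw [← fold_open_none rest i m (by simpa using fc_none_bal rest 0 hrest)]
            | some k =>
              obtain ⟨p, a, hpa, hplen, hpcnt, hpbal⟩ := fc_some_spec rest 0 k hrest
              have hpk : (p.length : Int) = (k : Int) := by exact_mod_cast congrArg Nat.cast hplen
              have htake : rest.take k = p := by rw [hpa]; exact List.take_left' hplen
              have hdrop : rest.drop (k+1) = a := by
                rw [hpa, List.drop_append, List.drop_eq_nil_of_le (by omega),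
                  show k + 1 - p.length = 1 from by omega, List.drop_succ_cons,
                  List.drop_zero, List.nil_append]
              have hpbal0 : ∀ q ∈ p.inits, q.count ']' ≤ q.count '[' := by
                intro q hq; have := hpbal q hq; omega
              have hpcnt0 : p.count ']' = p.count '[' := by omega
              simp only []
              rw [htake, hdrop]
              have han : a.length ≤ n := by
                have := congrArg List.length hpa; simp at this; omega
              have haf : a.length ≤ f' := by
                have := congrArg List.length hpa; simp at this; omega
              rw [ihn a han f' haf]
              have hfc : findClose ('[' :: rest) 0 =
                  (findClose a 0).map (fun j => k + 1 + j + 1) := by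
                rw [fc_open, fc_step_some rest 0 k hrest, hdrop, Option.map_map]
                rfl
              rw [hfc]
              cases hafter : findClose a 0 with
              | none =>
                simp only [Option.map_none]
                rw [show ('[' :: rest) = '[' :: (p ++ ']' :: a) from by rw [hpa],
                  fold_open_close p a i m hpbal0 hpcnt0, hpk]
              | some k2 =>
                simp only [Option.map_some]
                have htk : ('[' :: rest).take (k + 1 + k2 + 1) = '[' :: (p ++ ']' :: a.take k2) := by
                  rw [show k + 1 + k2 + 1 = (k + 1 + k2) + 1 from rfl, List.take_succ_cons,
                    hpa, List.take_append, List.take_of_length_le (by omega),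
                    show k + 1 + k2 - p.length = k2 + 1 from by omega, List.take_succ_cons]
                have hdk : ('[' :: rest).drop (k + 1 + k2 + 1 + 1) = a.drop (k2 + 1) := by
                  rw [show k + 1 + k2 + 1 + 1 = (k + 1 + k2 + 1) + 1 from rfl, List.drop_succ_cons,
                    hpa, List.drop_append, List.drop_eq_nil_of_le (by omega),
                    show k + 1 + k2 + 1 - p.length = k2 + 2 from by omega, List.drop_succ_cons,
                    List.nil_append]
                rw [htk, hdk, fold_open_close p (a.take k2) i m hpbal0 hpcnt0, hpk]
                refine congrArg₂ Prod.mk rfl (congrArg some (congrArg₂ Prod.mk ?_ rfl))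
                push_cast; ring
          · rw [walkB_other f' c rest i m h2 h1, ihn rest hrn f' hrf (i+1) m,
              fc_other c rest 0 h2 h1]
            cases hrest : findClose rest 0 with
            | none =>
              simp only [Option.map_none]
              rw [← fold_cons_other c rest i m h2 h1]
            | some j =>
              simp only [Option.map_some]
              rw [show (c :: rest).take (j+1) = c :: rest.take j from by simp [List.take_succ_cons],
                fold_cons_other c (rest.take j) i m h2 h1]
              refine congrArg₂ Prod.mk rfl (congrArg some (congrArg₂ Prod.mk ?_ ?_))
              · push_cast; ring
              · simp [List.drop_succ_cons]

-- ===== VERDICT (by name: the statement is the Claim_ definition above) =====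
theorem parse_spec : Claim_equal_parse := by
  intro program _ hpre
  unfold Spec_parse parse parse_alt
  rw [parse_fold_eq]
  set cmds := program.toList.filter (fun c => c ∈ "[]<>+-,.".toList) with hcmds
  have hfc : findClose cmds 0 = none := pre_findClose_none cmds hpre
  have hw := walk_spec cmds.length cmds le_rfl cmds.length le_rfl 0 PySem.Dict.empty
  rw [hfc] at hw
  simp only [topB, hw, List.nil_append]
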